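-- pv_equiv track=rewrite | github.com/InfiniTensor/InfiniOps | scripts/check_conventions.py | mask_cpp_comments_and_strings
-- ===== SOURCE A (Python) =====
-- def mask_cpp_comments_and_strings(text: str) -> str:
--     chars = list(text)
--     i = 0
--     state = "normal"
--     quote = ""
--
--     while i < len(chars):
--         c = chars[i]
--         nxt = chars[i + 1] if i + 1 < len(chars) else ""
--
--         if state == "normal":
--             if c == "/" and nxt == "/":
--                 chars[i] = chars[i + 1] = " "
--                 i += 2
--                 state = "line_comment"
--                 continue
--
--             if c == "/" and nxt == "*":
--                 chars[i] = chars[i + 1] = " "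
--                 i += 2
--                 state = "block_comment"
--                 continue
--
--             if c in {"'", '"'}:
--                 quote = c
--                 chars[i] = " "
--                 i += 1
--                 state = "string"
--                 continue
--
--             i += 1
--             continue
--
--         if state == "line_comment":
--             if c == "\n":
--                 state = "normal"
--             else:
--                 chars[i] = " "
--
--             i += 1
--             continue
--
--         if state == "block_comment":
--             if c == "*" and nxt == "/":
--                 chars[i] = chars[i + 1] = " "
--                 i += 2
--                 state = "normal"
--                 continue
--
--             if c != "\n":
--                 chars[i] = " "
--
--             i += 1
--             continue
--
--         if state == "string":
--             if c == "\\":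
--                 chars[i] = " "
--
--                 if i + 1 < len(chars):
--                     chars[i + 1] = " "
--
--                 i += 2
--                 continue
--
--             if c == quote:
--                 chars[i] = " "
--                 i += 1
--                 state = "normal"
--                 continue
--
--             if c != "\n":
--                 chars[i] = " "
--
--             i += 1
--             continue
--
--     return "".join(chars)
-- ===== SOURCE B (Python) =====
-- def mask_cpp_comments_and_strings(text: str) -> str:
--     # Tokenize-then-mask: consume whole comment/string tokens with find-based
--     # scans and emit masked spans, instead of a per-character state machine.
--     n = len(text)
--     out = []
--     i = 0
--     while i < n:
--         c = text[i]
--         if text.startswith('//', i):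
--             j = text.find('\n', i + 2)
--             end = n if j < 0 else j          # the newline itself stays ordinary text
--             out.append(' ' * (end - i))
--             i = end
--         elif text.startswith('/*', i):
--             j = text.find('*/', i + 2)
--             end = n if j < 0 else j + 2
--             out.append(''.join('\n' if ch == '\n' else ' ' for ch in text[i:end]))
--             i = end
--         elif c == '"' or c == "'":
--             buf = [' ']
--             j = i + 1
--             while j < n:
--                 d = text[j]
--                 if d == '\\':
--                     buf.append('  ' if j + 1 < n else ' ')
--                     j += 2
--                 elif d == c:
--                     buf.append(' ')
--                     j += 1
--                     break
--                 else:
--                     buf.append('\n' if d == '\n' else ' ')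
--                     j += 1
--             out.append(''.join(buf))
--             i = j
--         else:
--             out.append(c)
--             i += 1
--     return ''.join(out)
-- ===== Notes on version B (the rewrite author's own statement) =====
-- stated objective: alternative
-- what changed: Replaced the per-character four-state DFA that mutates a char list in place by a tokenize-then-mask pass: the scanner finds each comment/string token as one span (startswith/find-based) and emits a masked span, copying ordinary text unchanged.
import Mathlib
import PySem

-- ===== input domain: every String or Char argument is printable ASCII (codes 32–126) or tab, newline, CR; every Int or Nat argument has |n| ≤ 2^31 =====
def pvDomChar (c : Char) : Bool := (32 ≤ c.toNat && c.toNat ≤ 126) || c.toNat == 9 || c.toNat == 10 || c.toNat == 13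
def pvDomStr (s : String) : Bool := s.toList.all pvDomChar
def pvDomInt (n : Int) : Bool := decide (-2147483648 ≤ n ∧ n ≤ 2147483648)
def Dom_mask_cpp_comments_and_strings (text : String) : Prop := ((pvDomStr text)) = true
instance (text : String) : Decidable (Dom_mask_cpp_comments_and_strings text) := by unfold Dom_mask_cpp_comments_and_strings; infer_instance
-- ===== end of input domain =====

-- B replaces A's per-character four-state machine (mutating a char list in place) by a
-- tokenize-then-mask pass that consumes each comment/string token as one span; same output.

-- ===== PORT A =====
-- Literal port of A's while-loop: `chars` is the mutable char list, `i` the index,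
-- `state`/`quote` the Python variables; Python's ""-or-one-char string values
-- (`nxt`, `quote`) are ported as Option Char (none = "").  Every branch writes via
-- List.set exactly where A assigns; the final `else chars` arm is unreachable
-- (state is always one of the four literals; Python would loop forever there).
def maskA_loop (chars : List Char) (i : Nat) (state : String) (quote : Option Char) :
    List Char :=
  if h : i < chars.length then
    let c := chars[i]!
    let nxt : Option Char := if i + 1 < chars.length then some chars[i+1]! else none
    if state = "normal" then
      if c = '/' ∧ nxt = some '/' then
        maskA_loop ((chars.set i ' ').set (i+1) ' ') (i+2) "line_comment" quote
      else if c = '/' ∧ nxt = some '*' then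
        maskA_loop ((chars.set i ' ').set (i+1) ' ') (i+2) "block_comment" quote
      else if c = '\'' ∨ c = '"' then
        maskA_loop (chars.set i ' ') (i+1) "string" (some c)
      else
        maskA_loop chars (i+1) state quote
    else if state = "line_comment" then
      if c = '\n' then maskA_loop chars (i+1) "normal" quote
      else maskA_loop (chars.set i ' ') (i+1) state quote
    else if state = "block_comment" then
      if c = '*' ∧ nxt = some '/' then
        maskA_loop ((chars.set i ' ').set (i+1) ' ') (i+2) "normal" quote
      else if c ≠ '\n' then maskA_loop (chars.set i ' ') (i+1) state quote
      else maskA_loop chars (i+1) state quote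
    else if state = "string" then
      if c = '\\' then
        maskA_loop (if i + 1 < chars.length then (chars.set i ' ').set (i+1) ' '
                    else chars.set i ' ') (i+2) state quote
      else if some c = quote then maskA_loop (chars.set i ' ') (i+1) "normal" quote
      else if c ≠ '\n' then maskA_loop (chars.set i ' ') (i+1) state quote
      else maskA_loop chars (i+1) state quote
    else chars
  else chars
termination_by chars.length - i
decreasing_by
  all_goals first
    | omega
    | (simp [List.length_set]; omega)
    | (split <;> simp [List.length_set] <;> omega)

def mask_cpp_comments_and_strings (text : String) : String :=
  String.ofList (maskA_loop text.toList 0 "normal" none)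

-- ===== PORT B =====
-- helpers of B (ports of Source B's token scans: the find('*/')-delimited block-comment
-- span and the escape-aware string span; each returns (masked token, rest of text)).
def maskB_block : List Char → List Char × List Char
  | [] => ([], [])
  | c :: r =>
    if c = '*' ∧ r.head? = some '/' then ([' ', ' '], r.tail)
    else
      let p := maskB_block r
      ((if c = '\n' then '\n' else ' ') :: p.1, p.2)

def maskB_str (q : Char) : List Char → List Char × List Char
  | [] => ([], [])
  | c :: r =>
    if c = '\\' then
      if r.isEmpty then ([' '], [])
      else
        let p := maskB_str q r.tail
        (' ' :: ' ' :: p.1, p.2)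
    else if c = q then ([' '], r)
    else
      let p := maskB_str q r
      ((if c = '\n' then '\n' else ' ') :: p.1, p.2)
termination_by l => l.length
decreasing_by all_goals simp [List.length_tail] <;> omega

-- length facts the main scanner's termination needs (cited in decreasing_by)
theorem maskB_block_len (l : List Char) : (maskB_block l).2.length ≤ l.length := by
  induction l with
  | nil => simp [maskB_block]
  | cons c r ih =>
    by_cases h : c = '*' ∧ r.head? = some '/'
    · simp [maskB_block, h, List.length_tail]; omega
    · simp [maskB_block, h]; omega

theorem maskB_str_len (q : Char) : ∀ (n : Nat) (l : List Char), l.length ≤ n →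
    (maskB_str q l).2.length ≤ l.length := by
  intro n
  induction n with
  | zero =>
    intro l hl
    have : l = [] := List.eq_nil_of_length_eq_zero (Nat.le_zero.mp hl)
    subst this; simp [maskB_str]
  | succ n ih =>
    intro l hl
    cases l with
    | nil => simp [maskB_str]
    | cons c r =>
      simp only [List.length_cons] at hl
      by_cases h1 : c = '\\'
      · cases r with
        | nil => simp [maskB_str, h1]
        | cons d r' =>
          simp only [List.length_cons] at hl
          have := ih r' (by omega)
          simp [maskB_str, h1]; omega
      · by_cases h2 : c = q
        · subst h2; simp [maskB_str, h1]
        · have := ih r (by omega)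
          simp [maskB_str, h1, h2]; omega

theorem maskB_str_len_le (q : Char) (l : List Char) : (maskB_str q l).2.length ≤ l.length :=
  maskB_str_len q l.length l (Nat.le_refl _)

-- B's main scanner: ordinary text is copied char by char; '//', '/*', '"', '\'' start
-- a token that is masked as one span (Source B does this with startswith/find and span masks).
def maskB_go (l : List Char) : List Char :=
  match l with
  | [] => []
  | c :: rest =>
    if c = '/' ∧ rest.head? = some '/' then
      ' ' :: ' ' :: ((rest.tail.takeWhile (· ≠ '\n')).map fun _ => ' ')
        ++ maskB_go (rest.tail.dropWhile (· ≠ '\n'))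
    else if c = '/' ∧ rest.head? = some '*' then
      let p := maskB_block rest.tail
      ' ' :: ' ' :: p.1 ++ maskB_go p.2
    else if c = '"' ∨ c = '\'' then
      let p := maskB_str c rest
      ' ' :: p.1 ++ maskB_go p.2
    else c :: maskB_go rest
termination_by l.length
decreasing_by
  · have h1 := List.length_dropWhile_le (p := (· ≠ '\n')) (l := rest.tail)
    have h1' := List.length_dropWhile_le (p := fun x => !decide (x = '\n')) (l := rest.tail)
    have h2 : rest.tail.length = rest.length - 1 := List.length_tail
    simp <;> omega
  · have h1 := maskB_block_len rest.tail
    have h2 : rest.tail.length = rest.length - 1 := List.length_tail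
    simp; omega
  · have h1 := maskB_str_len_le c rest
    simp; omega
  · simp

def mask_cpp_comments_and_strings_alt (text : String) : String :=
  String.ofList (maskB_go text.toList)

-- ===== PRECONDITION & SPEC =====
def Spec_mask_cpp_comments_and_strings (text : String) (out : String) : Prop := out = mask_cpp_comments_and_strings_alt text
instance (text : String) (out : String) : Decidable (Spec_mask_cpp_comments_and_strings text out) := by unfold Spec_mask_cpp_comments_and_strings; infer_instance

-- ===== CLAIM (what is proved, stated in full; the proofs are below) =====
def Claim_equal_mask_cpp_comments_and_strings : Prop := ∀ (text : String), Dom_mask_cpp_comments_and_strings text → Spec_mask_cpp_comments_and_strings text (mask_cpp_comments_and_strings text)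

-- ===== LEMMAS AND PROOFS =====

-- A's loop never reads a cell it has written (all writes land strictly below the next
-- read index), so it equals `finished prefix ++ suffix machine`.  `maskA_suf` is that
-- suffix machine: same four states, same branch order, input consumed head-first.
def maskA_suf (l : List Char) (state : String) (quote : Option Char) : List Char :=
  match l with
  | [] => []
  | c :: rest =>
    if state = "normal" then
      if c = '/' ∧ rest.head? = some '/' then ' ' :: ' ' :: maskA_suf rest.tail "line_comment" quote
      else if c = '/' ∧ rest.head? = some '*' then ' ' :: ' ' :: maskA_suf rest.tail "block_comment" quote
      else if c = '\'' ∨ c = '"' then ' ' :: maskA_suf rest "string" (some c)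
      else c :: maskA_suf rest state quote
    else if state = "line_comment" then
      if c = '\n' then c :: maskA_suf rest "normal" quote
      else ' ' :: maskA_suf rest state quote
    else if state = "block_comment" then
      if c = '*' ∧ rest.head? = some '/' then ' ' :: ' ' :: maskA_suf rest.tail "normal" quote
      else if c ≠ '\n' then ' ' :: maskA_suf rest state quote
      else c :: maskA_suf rest state quote
    else if state = "string" then
      if c = '\\' then
        if rest.isEmpty then [' ']
        else ' ' :: ' ' :: maskA_suf rest.tail state quote
      else if some c = quote then ' ' :: maskA_suf rest "normal" quote
      else if c ≠ '\n' then ' ' :: maskA_suf rest state quote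
      else c :: maskA_suf rest state quote
    else c :: rest
termination_by l.length
decreasing_by all_goals (have : rest.tail.length = rest.length - 1 := List.length_tail; simp <;> omega)

theorem set_at_len (pre l : List Char) (c a : Char) :
    (pre ++ c :: l).set pre.length a = pre ++ a :: l := by
  induction pre with
  | nil => simp
  | cons x xs ih => simp [ih]

theorem set_at_len_succ (pre l : List Char) (c d a : Char) :
    (pre ++ c :: d :: l).set (pre.length + 1) a = pre ++ c :: a :: l := by
  have := set_at_len (pre ++ [c]) l d a
  simpa using this

theorem getBang_at_len (pre l : List Char) (c : Char) :
    (pre ++ c :: l)[pre.length]! = c := by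
  induction pre with
  | nil => simp
  | cons x xs ih => simpa using ih

theorem getBang_at_len_succ (pre l : List Char) (c d : Char) :
    (pre ++ c :: d :: l)[pre.length + 1]! = d := by
  have := getBang_at_len (pre ++ [c]) l d
  simpa using this

theorem maskA_loop_stop (chars : List Char) (i : Nat) (st : String) (q : Option Char)
    (h : ¬ i < chars.length) : maskA_loop chars i st q = chars := by
  rw [maskA_loop.eq_def]; simp [h]

theorem nxt_eq_head? (pre rest : List Char) (c : Char) :
    (if pre.length + 1 < (pre ++ c :: rest).length
      then some (pre ++ c :: rest)[pre.length + 1]! else none) = rest.head? := by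
  cases rest with
  | nil => simp
  | cons d r => simp [getBang_at_len_succ]

-- the bridge: A's index loop is `done prefix ++ suffix machine`
theorem maskA_bridge : ∀ (n : Nat) (l : List Char), l.length ≤ n →
    ∀ (pre : List Char) (st : String) (q : Option Char),
    maskA_loop (pre ++ l) pre.length st q = pre ++ maskA_suf l st q := by
  intro n
  induction n with
  | zero =>
    intro l hl pre st q
    have : l = [] := List.eq_nil_of_length_eq_zero (Nat.le_zero.mp hl)
    subst this
    simp [maskA_loop_stop, maskA_suf]
  | succ n ih =>
    intro l hl pre st q
    cases l with
    | nil => simp [maskA_loop_stop, maskA_suf]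
    | cons c rest =>
      rw [maskA_loop.eq_def]
      have hlt : pre.length < (pre ++ c :: rest).length := by simp
      simp only [dif_pos hlt, getBang_at_len, nxt_eq_head?]
      simp only [List.length_cons] at hl
      by_cases hst1 : st = "normal"
      · by_cases h1 : c = '/' ∧ rest.head? = some '/'
        · obtain ⟨d, r, rfl⟩ : ∃ d r, rest = d :: r := by
            cases rest with
            | nil => simp at h1
            | cons d r => exact ⟨d, r, rfl⟩
          rw [if_pos hst1, if_pos h1, set_at_len, set_at_len_succ]
          have : pre ++ ' ' :: ' ' :: r = (pre ++ [' ', ' ']) ++ r := by simp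
          rw [this, show pre.length + 2 = (pre ++ [' ', ' ']).length by simp,
              ih r (by simp at hl; omega)]
          simp [maskA_suf, hst1, h1]
        · by_cases h2 : c = '/' ∧ rest.head? = some '*'
          · obtain ⟨d, r, rfl⟩ : ∃ d r, rest = d :: r := by
              cases rest with
              | nil => simp at h2
              | cons d r => exact ⟨d, r, rfl⟩
            rw [if_pos hst1, if_neg h1, if_pos h2, set_at_len, set_at_len_succ]
            have : pre ++ ' ' :: ' ' :: r = (pre ++ [' ', ' ']) ++ r := by simp
            rw [this, show pre.length + 2 = (pre ++ [' ', ' ']).length by simp,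
                ih r (by simp at hl; omega)]
            simp [maskA_suf, hst1, h1, h2]
          · by_cases h3 : c = '\'' ∨ c = '"'
            · rw [if_pos hst1, if_neg h1, if_neg h2, if_pos h3, set_at_len]
              have : pre ++ ' ' :: rest = (pre ++ [' ']) ++ rest := by simp
              rw [this, show pre.length + 1 = (pre ++ [' ']).length by simp,
                  ih rest (by omega)]
              simp [maskA_suf, hst1, h1, h2, h3]
            · rw [if_pos hst1, if_neg h1, if_neg h2, if_neg h3]
              have : pre ++ c :: rest = (pre ++ [c]) ++ rest := by simp
              rw [this, show pre.length + 1 = (pre ++ [c]).length by simp,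
                  ih rest (by omega)]
              simp [maskA_suf, hst1, h1, h2, h3]
      · by_cases hst2 : st = "line_comment"
        · by_cases h1 : c = '\n'
          · rw [if_neg hst1, if_pos hst2, if_pos h1]
            have : pre ++ c :: rest = (pre ++ [c]) ++ rest := by simp
            rw [this, show pre.length + 1 = (pre ++ [c]).length by simp,
                ih rest (by omega)]
            simp [maskA_suf, hst1, hst2, h1]
          · rw [if_neg hst1, if_pos hst2, if_neg h1, set_at_len]
            have : pre ++ ' ' :: rest = (pre ++ [' ']) ++ rest := by simp
            rw [this, show pre.length + 1 = (pre ++ [' ']).length by simp,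
                ih rest (by omega)]
            simp [maskA_suf, hst1, hst2, h1]
        · by_cases hst3 : st = "block_comment"
          · by_cases h1 : c = '*' ∧ rest.head? = some '/'
            · obtain ⟨d, r, rfl⟩ : ∃ d r, rest = d :: r := by
                cases rest with
                | nil => simp at h1
                | cons d r => exact ⟨d, r, rfl⟩
              rw [if_neg hst1, if_neg hst2, if_pos hst3, if_pos h1, set_at_len, set_at_len_succ]
              have : pre ++ ' ' :: ' ' :: r = (pre ++ [' ', ' ']) ++ r := by simp
              rw [this, show pre.length + 2 = (pre ++ [' ', ' ']).length by simp,
                  ih r (by simp at hl; omega)]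
              simp [maskA_suf, hst1, hst2, hst3, h1]
            · by_cases h2 : c ≠ '\n'
              · rw [if_neg hst1, if_neg hst2, if_pos hst3, if_neg h1, if_pos h2, set_at_len]
                have : pre ++ ' ' :: rest = (pre ++ [' ']) ++ rest := by simp
                rw [this, show pre.length + 1 = (pre ++ [' ']).length by simp,
                    ih rest (by omega)]
                simp [maskA_suf, hst1, hst2, hst3, h1, h2]
              · rw [if_neg hst1, if_neg hst2, if_pos hst3, if_neg h1, if_neg h2]
                have : pre ++ c :: rest = (pre ++ [c]) ++ rest := by simp
                rw [this, show pre.length + 1 = (pre ++ [c]).length by simp,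
                    ih rest (by omega)]
                simp [maskA_suf, hst1, hst2, hst3, h1, h2]
          · by_cases hst4 : st = "string"
            · by_cases h1 : c = '\\'
              · cases rest with
                | nil =>
                  rw [if_neg hst1, if_neg hst2, if_neg hst3, if_pos hst4, if_pos h1]
                  have hc : ¬ pre.length + 1 < (pre ++ [c]).length := by simp
                  rw [if_neg hc, set_at_len, maskA_loop_stop _ _ _ _ (by simp)]
                  simp [maskA_suf, hst1, hst2, hst3, hst4, h1]
                | cons d r =>
                  rw [if_neg hst1, if_neg hst2, if_neg hst3, if_pos hst4, if_pos h1]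
                  have hc : pre.length + 1 < (pre ++ c :: d :: r).length := by simp
                  rw [if_pos hc, set_at_len, set_at_len_succ]
                  have : pre ++ ' ' :: ' ' :: r = (pre ++ [' ', ' ']) ++ r := by simp
                  rw [this, show pre.length + 2 = (pre ++ [' ', ' ']).length by simp,
                      ih r (by simp at hl; omega)]
                  simp [maskA_suf, hst1, hst2, hst3, hst4, h1]
              · by_cases h2 : some c = q
                · rw [if_neg hst1, if_neg hst2, if_neg hst3, if_pos hst4, if_neg h1, if_pos h2,
                      set_at_len]
                  have : pre ++ ' ' :: rest = (pre ++ [' ']) ++ rest := by simp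
                  rw [this, show pre.length + 1 = (pre ++ [' ']).length by simp,
                      ih rest (by omega)]
                  simp [maskA_suf, hst1, hst2, hst3, hst4, h1, h2]
                · by_cases h3 : c ≠ '\n'
                  · rw [if_neg hst1, if_neg hst2, if_neg hst3, if_pos hst4, if_neg h1, if_neg h2,
                        if_pos h3, set_at_len]
                    have : pre ++ ' ' :: rest = (pre ++ [' ']) ++ rest := by simp
                    rw [this, show pre.length + 1 = (pre ++ [' ']).length by simp,
                        ih rest (by omega)]
                    simp [maskA_suf, hst1, hst2, hst3, hst4, h1, h2, h3]
                  · rw [if_neg hst1, if_neg hst2, if_neg hst3, if_pos hst4, if_neg h1, if_neg h2,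
                        if_neg h3]
                    have : pre ++ c :: rest = (pre ++ [c]) ++ rest := by simp
                    rw [this, show pre.length + 1 = (pre ++ [c]).length by simp,
                        ih rest (by omega)]
                    simp [maskA_suf, hst1, hst2, hst3, hst4, h1, h2, h3]
            · rw [if_neg hst1, if_neg hst2, if_neg hst3, if_neg hst4]
              simp [maskA_suf, hst1, hst2, hst3, hst4]

theorem maskA_eq_suf (l : List Char) (st : String) (q : Option Char) :
    maskA_loop l 0 st q = maskA_suf l st q := by
  simpa using maskA_bridge l.length l (Nat.le_refl _) [] st q

-- token lemmas: each of A's non-normal states runs exactly one of B's token scans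
theorem line_token (q : Option Char) (l : List Char) :
    maskA_suf l "line_comment" q =
      (l.takeWhile (· ≠ '\n')).map (fun _ => ' ')
        ++ maskA_suf (l.dropWhile (· ≠ '\n')) "normal" q := by
  induction l with
  | nil => simp [maskA_suf]
  | cons c rest ih =>
    by_cases h : c = '\n'
    · subst h
      simp [maskA_suf, List.takeWhile, List.dropWhile]
    · simp [maskA_suf, List.takeWhile, List.dropWhile, h, ih]

theorem block_token (q : Option Char) : ∀ (n : Nat) (l : List Char), l.length ≤ n →
    maskA_suf l "block_comment" q
      = (maskB_block l).1 ++ maskA_suf (maskB_block l).2 "normal" q := by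
  intro n
  induction n with
  | zero =>
    intro l hl
    have : l = [] := List.eq_nil_of_length_eq_zero (Nat.le_zero.mp hl)
    subst this; simp [maskA_suf, maskB_block]
  | succ n ih =>
    intro l hl
    cases l with
    | nil => simp [maskA_suf, maskB_block]
    | cons c rest =>
      simp only [List.length_cons] at hl
      by_cases h : c = '*' ∧ rest.head? = some '/'
      · simp [maskA_suf, maskB_block, h]
      · by_cases h2 : c = '\n' <;>
          simp [maskA_suf, maskB_block, h, h2, ih rest (by omega)]

theorem str_token (qc : Char) : ∀ (n : Nat) (l : List Char), l.length ≤ n →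
    maskA_suf l "string" (some qc)
      = (maskB_str qc l).1 ++ maskA_suf (maskB_str qc l).2 "normal" (some qc) := by
  intro n
  induction n with
  | zero =>
    intro l hl
    have : l = [] := List.eq_nil_of_length_eq_zero (Nat.le_zero.mp hl)
    subst this; simp [maskA_suf, maskB_str]
  | succ n ih =>
    intro l hl
    cases l with
    | nil => simp [maskA_suf, maskB_str]
    | cons c rest =>
      simp only [List.length_cons] at hl
      by_cases h1 : c = '\\'
      · cases rest with
        | nil => simp [maskA_suf, maskB_str, h1]
        | cons d r =>
          simp only [List.length_cons] at hl
          simp [maskA_suf, maskB_str, h1, ih r (by omega)]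
      · by_cases h2 : c = qc
        · subst h2; simp [maskA_suf, maskB_str, h1]
        · have h2' : ¬ (some c = some qc) := by simp [h2]
          by_cases h3 : c = '\n'
          · subst h3
            simp [maskA_suf, maskB_str, h1, h2, h2', ih rest (by omega)]
          · simp [maskA_suf, maskB_str, h1, h2, h2', h3, ih rest (by omega)]

-- branch equations of maskB_go (used by the main lemma below)
theorem maskB_go_line (c : Char) (rest : List Char) (h : c = '/' ∧ rest.head? = some '/') :
    maskB_go (c :: rest)
      = ' ' :: ' ' :: ((rest.tail.takeWhile (· ≠ '\n')).map fun _ => ' ')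
          ++ maskB_go (rest.tail.dropWhile (· ≠ '\n')) := by
  conv_lhs => rw [maskB_go.eq_def]
  simp [h]

theorem maskB_go_block (c : Char) (rest : List Char)
    (h1 : ¬ (c = '/' ∧ rest.head? = some '/')) (h2 : c = '/' ∧ rest.head? = some '*') :
    maskB_go (c :: rest)
      = ' ' :: ' ' :: (maskB_block rest.tail).1 ++ maskB_go (maskB_block rest.tail).2 := by
  conv_lhs => rw [maskB_go.eq_def]
  simp [h1, h2]

theorem maskB_go_str (c : Char) (rest : List Char)
    (h1 : ¬ (c = '/' ∧ rest.head? = some '/')) (h2 : ¬ (c = '/' ∧ rest.head? = some '*'))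
    (h3 : c = '"' ∨ c = '\'') :
    maskB_go (c :: rest) = ' ' :: (maskB_str c rest).1 ++ maskB_go (maskB_str c rest).2 := by
  conv_lhs => rw [maskB_go.eq_def]
  simp [h1, h2, h3]

theorem maskB_go_plain (c : Char) (rest : List Char)
    (h1 : ¬ (c = '/' ∧ rest.head? = some '/')) (h2 : ¬ (c = '/' ∧ rest.head? = some '*'))
    (h3 : ¬ (c = '"' ∨ c = '\'')) :
    maskB_go (c :: rest) = c :: maskB_go rest := by
  conv_lhs => rw [maskB_go.eq_def]
  simp [h1, h2, h3]

-- main lemma: the suffix machine from state "normal" is B's scanner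
theorem suf_normal_eq_go : ∀ (n : Nat) (l : List Char), l.length ≤ n →
    ∀ (q : Option Char), maskA_suf l "normal" q = maskB_go l := by
  intro n
  induction n with
  | zero =>
    intro l hl q
    have : l = [] := List.eq_nil_of_length_eq_zero (Nat.le_zero.mp hl)
    subst this; simp [maskA_suf, maskB_go]
  | succ n ih =>
    intro l hl q
    cases l with
    | nil => simp [maskA_suf, maskB_go]
    | cons c rest =>
      simp only [List.length_cons] at hl
      by_cases h1 : c = '/' ∧ rest.head? = some '/'
      · rw [show maskA_suf (c :: rest) "normal" q
            = ' ' :: ' ' :: maskA_suf rest.tail "line_comment" q from by simp [maskA_suf, h1],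
            line_token,
            ih (rest.tail.dropWhile (· ≠ '\n'))
              (by have hd := List.length_dropWhile_le (p := (· ≠ '\n')) (l := rest.tail)
                  have ht : rest.tail.length = rest.length - 1 := List.length_tail
                  omega),
            maskB_go_line c rest h1]
        simp
      · by_cases h2 : c = '/' ∧ rest.head? = some '*'
        · rw [show maskA_suf (c :: rest) "normal" q
              = ' ' :: ' ' :: maskA_suf rest.tail "block_comment" q from by
                simp [maskA_suf, h1, h2],
              block_token q rest.tail.length rest.tail (Nat.le_refl _),
              ih (maskB_block rest.tail).2
                (by have hb := maskB_block_len rest.tail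
                    have ht : rest.tail.length = rest.length - 1 := List.length_tail
                    omega),
              maskB_go_block c rest h1 h2]
          simp
        · by_cases h3 : c = '\'' ∨ c = '"'
          · rw [show maskA_suf (c :: rest) "normal" q
                = ' ' :: maskA_suf rest "string" (some c) from by simp [maskA_suf, h1, h2, h3],
              str_token c rest.length rest (Nat.le_refl _),
              ih (maskB_str c rest).2 (by have := maskB_str_len_le c rest; omega),
              maskB_go_str c rest h1 h2 h3.symm]
            simp
          · rw [show maskA_suf (c :: rest) "normal" q
                = c :: maskA_suf rest "normal" q from by simp [maskA_suf, h1, h2, h3],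
              ih rest (by omega),
              maskB_go_plain c rest h1 h2 (by tauto)]

-- ===== VERDICT (by name: the statement is the Claim_ definition above) =====
theorem mask_cpp_comments_and_strings_spec : Claim_equal_mask_cpp_comments_and_strings := by
  intro text _
  unfold Spec_mask_cpp_comments_and_strings mask_cpp_comments_and_strings
    mask_cpp_comments_and_strings_alt
  rw [maskA_eq_suf, suf_normal_eq_go text.toList.length text.toList (Nat.le_refl _)]
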